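-- pv_equiv track=rewrite | github.com/dmitry-pechersky/algorithms | uvaonlinejudge/10036 - Divisibility.py | divisibility_dp
-- ===== SOURCE A (Python) =====
-- def divisibility_dp(nums, k):
--     n = len(nums)
--     current = [False] * k
--     current[0] = True
--     for i in nums:
--         previous, current = current, [False] * k
--         for j in range(0, k):
--             if previous[j]:
--                 current[abs(j + i) % k] = True
--                 current[abs(j - i) % k] = True
--     return current[0]
-- ===== SOURCE B (Python) =====
-- def divisibility_dp(nums, k):
--     # Divide and conquer: the residues of all signed sums of a list are the
--     # pairwise sums (mod k) of the residue sets of its two halves, since the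
--     # sign choices in the halves are independent.
--     def reach(sub):
--         if not sub:
--             return {0}
--         if len(sub) == 1:
--             x = sub[0]
--             return {x % k, -x % k}
--         mid = len(sub) // 2
--         return {(a + b) % k for a in reach(sub[:mid]) for b in reach(sub[mid:])}
--     return 0 in reach(nums)
-- ===== Notes on version B (the rewrite author's own statement) =====
-- stated objective: alternative
-- what changed: Replaces the linear boolean-array DP (rescanning all k slots per number, with abs applied at each step) by a divide-and-conquer recursion that computes the set of signed-sum residues of each half of the list and combines halves by a pairwise sumset mod k; correct because the sign choices in the two halves are independent and A's answer equals plain signed-sum reachability.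
import Mathlib
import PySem

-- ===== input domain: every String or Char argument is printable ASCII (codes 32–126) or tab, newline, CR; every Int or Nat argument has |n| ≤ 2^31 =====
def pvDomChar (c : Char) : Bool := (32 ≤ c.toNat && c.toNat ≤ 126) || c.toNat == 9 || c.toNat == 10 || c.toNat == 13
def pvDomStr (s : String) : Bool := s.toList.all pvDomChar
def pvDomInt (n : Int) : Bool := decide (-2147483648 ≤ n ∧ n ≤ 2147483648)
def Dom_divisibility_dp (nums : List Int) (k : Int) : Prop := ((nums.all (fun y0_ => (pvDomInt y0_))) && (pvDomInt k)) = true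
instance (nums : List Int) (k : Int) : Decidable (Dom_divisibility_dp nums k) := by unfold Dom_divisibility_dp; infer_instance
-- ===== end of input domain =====

-- B replaces A's linear boolean-array DP by a divide-and-conquer recursion over halves of the
-- list, combining the residue sets of the halves by a pairwise sumset mod k (objective: alternative).

-- ===== PORT A =====
-- literal port: boolean array `current` of length k (Array Bool for the Python list of booleans),
-- rebuilt per number, inner scan over range(0, k); `previous[j]` with j from range(0, k) and
-- `current[...] = True` with index abs(..) % k are always in range for k ≥ 1 (Pre_), so they are
-- read with .getD / written with .setIfInBounds.
def divisibility_dp (nums : List Int) (k : Int) : Bool :=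
  let current0 := (Array.replicate k.toNat false).setIfInBounds 0 true
  let final := nums.foldl (fun previous i =>
    (PySem.List.pyRange 0 k 1).foldl (fun current j =>
      if previous.getD j.toNat false then
        (current.setIfInBounds (PySem.Int.mod |j + i| k).toNat true).setIfInBounds
          (PySem.Int.mod |j - i| k).toNat true
      else current) (Array.replicate k.toNat false)) current0
  final.getD 0 false

-- ===== PORT B =====
-- literal port of Source B's inner `reach`: the slices sub[:mid]/sub[mid:] with 0 ≤ mid ≤ len(sub)
-- are exactly List.take/List.drop; the set comprehension (a outer, b inner) is
-- Set.ofList of the flatMap in the same order.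
def pvReach (k : Int) (l : List Int) : PySem.Set Int :=
  match l with
  | [] => PySem.Set.ofList [(0 : Int)]
  | [x] => PySem.Set.ofList [PySem.Int.mod x k, PySem.Int.mod (-x) k]
  | x :: y :: t =>
    let mid := (x :: y :: t).length / 2
    PySem.Set.ofList (((pvReach k ((x :: y :: t).take mid)).flatMap (fun a =>
      (pvReach k ((x :: y :: t).drop mid)).map (fun b => PySem.Int.mod (a + b) k))))
termination_by l.length
decreasing_by
  · simp; omega
  · simp; omega

def divisibility_dp_alt (nums : List Int) (k : Int) : Bool :=
  PySem.Set.contains (pvReach k nums) 0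

-- ===== PRECONDITION & SPEC =====
-- Pre_ excludes k ≤ 0, on which A raises IndexError (`current[0] = True` on the empty list `[False]*k`).
def Pre_divisibility_dp (nums : List Int) (k : Int) : Prop := 1 ≤ k
instance (nums : List Int) (k : Int) : Decidable (Pre_divisibility_dp nums k) := by unfold Pre_divisibility_dp; infer_instance
def pvWitness_divisibility_dp : List Int × Int := ([7, 2, 4], 5)

def Spec_divisibility_dp (nums : List Int) (k : Int) (out : Bool) : Prop := out = divisibility_dp_alt nums k
instance (nums : List Int) (k : Int) (out : Bool) : Decidable (Spec_divisibility_dp nums k out) := by unfold Spec_divisibility_dp; infer_instance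

-- ===== CLAIM (what is proved, stated in full; the proofs are below) =====
def Claim_equal_divisibility_dp : Prop := ∀ (nums : List Int) (k : Int), Dom_divisibility_dp nums k → Pre_divisibility_dp nums k → Spec_divisibility_dp nums k (divisibility_dp nums k)

-- ===== LEMMAS AND PROOFS =====

-- signed sums: PvSS l s ↔ s = ±l₀ ± l₁ ± … for some choice of signs
inductive PvSS : List Int → Int → Prop
  | nil : PvSS [] 0
  | plus {t : List Int} {s : Int} (x : Int) : PvSS t s → PvSS (x :: t) (s + x)
  | minus {t : List Int} {s : Int} (x : Int) : PvSS t s → PvSS (x :: t) (s - x)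

lemma pvSS_nil_iff (s : Int) : PvSS [] s ↔ s = 0 := by
  constructor
  · intro h; cases h; rfl
  · rintro rfl; exact PvSS.nil

lemma pvSS_cons_iff (x : Int) (t : List Int) (s : Int) :
    PvSS (x :: t) s ↔ ∃ a, PvSS t a ∧ (s = a + x ∨ s = a - x) := by
  constructor
  · intro h
    cases h with
    | plus _ h => exact ⟨_, h, Or.inl rfl⟩
    | minus _ h => exact ⟨_, h, Or.inr rfl⟩
  · rintro ⟨a, ha, rfl | rfl⟩
    exacts [PvSS.plus x ha, PvSS.minus x ha]

lemma pvSS_neg {l : List Int} {s : Int} (h : PvSS l s) : PvSS l (-s) := by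
  induction h with
  | nil => simpa using PvSS.nil
  | plus x _ ih => have := PvSS.minus x ih; convert this using 1; ring
  | minus x _ ih => have := PvSS.plus x ih; convert this using 1; ring

lemma pvSS_append (l₁ l₂ : List Int) (s : Int) :
    PvSS (l₁ ++ l₂) s ↔ ∃ a b, PvSS l₁ a ∧ PvSS l₂ b ∧ s = a + b := by
  induction l₁ generalizing s with
  | nil =>
    simp only [List.nil_append]
    constructor
    · intro h; exact ⟨0, s, PvSS.nil, h, by ring⟩
    · rintro ⟨a, b, ha, hb, rfl⟩
      rw [pvSS_nil_iff] at ha; subst ha; simpa using hb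
  | cons x t ih =>
    rw [List.cons_append]
    constructor
    · intro h
      obtain ⟨c, hc, hcs⟩ := (pvSS_cons_iff x (t ++ l₂) s).mp h
      obtain ⟨a, b, ha, hb, rfl⟩ := (ih c).mp hc
      rcases hcs with rfl | rfl
      · exact ⟨a + x, b, PvSS.plus x ha, hb, by ring⟩
      · exact ⟨a - x, b, PvSS.minus x ha, hb, by ring⟩
    · rintro ⟨a, b, ha, hb, rfl⟩
      obtain ⟨a', ha', rfl | rfl⟩ := (pvSS_cons_iff x t a).mp ha
      · have h1 : PvSS (t ++ l₂) (a' + b) := (ih _).mpr ⟨a', b, ha', hb, rfl⟩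
        have h2 := PvSS.plus x h1
        convert h2 using 1; ring
      · have h1 : PvSS (t ++ l₂) (a' + b) := (ih _).mpr ⟨a', b, ha', hb, rfl⟩
        have h2 := PvSS.minus x h1
        convert h2 using 1; ring

lemma pvSS_singleton (x s : Int) : PvSS [x] s ↔ s = x ∨ s = -x := by
  simp only [pvSS_cons_iff, pvSS_nil_iff]
  constructor
  · rintro ⟨a, rfl, rfl | rfl⟩ <;> simp
  · rintro (rfl | rfl)
    exacts [⟨0, rfl, Or.inl (by ring)⟩, ⟨0, rfl, Or.inr (by ring)⟩]

-- mod toolkit (k > 0): PySem.Int.mod is Int.emod there, and residues are congruence-invariant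
lemma pvMod_congr {k : Int} (hk : 0 < k) {a b : Int} (h : a ≡ b [ZMOD k]) :
    PySem.Int.mod a k = PySem.Int.mod b k := by
  rw [PySem.Int.mod_eq_emod_of_pos hk, PySem.Int.mod_eq_emod_of_pos hk]
  exact h

lemma pvMod_self_congr {k : Int} (hk : 0 < k) (a : Int) : (PySem.Int.mod a k) ≡ a [ZMOD k] := by
  rw [PySem.Int.mod_eq_emod_of_pos hk]
  exact Int.emod_emod_of_dvd _ dvd_rfl

-- the two cells A writes from slot u = (v mod k): each is (±(v+w)) mod k
lemma pvCell {k : Int} (hk : 0 < k) {u v : Int} (hu : u = PySem.Int.mod v k) (w : Int) :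
    PySem.Int.mod |u + w| k = PySem.Int.mod (v + w) k ∨
    PySem.Int.mod |u + w| k = PySem.Int.mod (-(v + w)) k := by
  have hcong : (u + w) ≡ (v + w) [ZMOD k] := by
    subst hu; exact Int.ModEq.add_right w (pvMod_self_congr hk v)
  rcases abs_cases (u + w) with ⟨he, _⟩ | ⟨he, _⟩
  · exact Or.inl (by rw [he]; exact pvMod_congr hk hcong)
  · exact Or.inr (by rw [he]; exact pvMod_congr hk hcong.neg)

-- ===== B-side correctness: pvReach computes exactly the signed-sum residues =====
lemma pvReach_mem {k : Int} (hk : 0 < k) :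
    ∀ (n : Nat) (l : List Int), l.length ≤ n → ∀ r : Int,
      (r ∈ pvReach k l ↔ ∃ s, PvSS l s ∧ r = PySem.Int.mod s k) := by
  have h0 : PySem.Int.mod 0 k = 0 := by
    rw [PySem.Int.mod_eq_emod_of_pos hk]; simp
  intro n
  induction n with
  | zero =>
    intro l hl r
    have : l = [] := List.length_eq_zero_iff.mp (Nat.le_zero.mp hl)
    subst this
    rw [pvReach]
    simp [PySem.Set.mem_ofList, pvSS_nil_iff, h0]
  | succ n ih =>
    intro l hl r
    match l with
    | [] =>
      rw [pvReach]
      simp [PySem.Set.mem_ofList, pvSS_nil_iff, h0]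
    | [x] =>
      rw [pvReach]
      simp only [PySem.Set.mem_ofList, List.mem_cons, List.not_mem_nil, or_false, pvSS_singleton]
      constructor
      · rintro (rfl | rfl)
        exacts [⟨x, Or.inl rfl, rfl⟩, ⟨-x, Or.inr rfl, rfl⟩]
      · rintro ⟨s, rfl | rfl, rfl⟩
        exacts [Or.inl rfl, Or.inr rfl]
    | x :: y :: t =>
      rw [pvReach]
      have hlen : (x :: y :: t).length = t.length + 2 := by simp
      set L := x :: y :: t with hL
      set mid := L.length / 2 with hmid
      have htake : (L.take mid).length ≤ n := by
        rw [List.length_take]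
        have h1 : L.length ≤ n + 1 := hl
        rw [hlen] at h1 ⊢
        omega
      have hdrop : (L.drop mid).length ≤ n := by
        rw [List.length_drop]
        have h1 : L.length ≤ n + 1 := hl
        rw [hlen] at h1 ⊢
        omega
      simp only [PySem.Set.mem_ofList, List.mem_flatMap, List.mem_map]
      constructor
      · rintro ⟨a, ha, b, hb, rfl⟩
        obtain ⟨s₁, hs₁, rfl⟩ := (ih (L.take mid) htake a).mp ha
        obtain ⟨s₂, hs₂, rfl⟩ := (ih (L.drop mid) hdrop b).mp hb
        refine ⟨s₁ + s₂, ?_, ?_⟩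
        · rw [← List.take_append_drop mid L]
          exact (pvSS_append _ _ _).mpr ⟨s₁, s₂, hs₁, hs₂, rfl⟩
        · exact pvMod_congr hk ((pvMod_self_congr hk s₁).add (pvMod_self_congr hk s₂))
      · rintro ⟨s, hs, rfl⟩
        rw [← List.take_append_drop mid L, pvSS_append] at hs
        obtain ⟨a, b, ha, hb, rfl⟩ := hs
        refine ⟨PySem.Int.mod a k, (ih _ htake _).mpr ⟨a, ha, rfl⟩,
                PySem.Int.mod b k, (ih _ hdrop _).mpr ⟨b, hb, rfl⟩, ?_⟩
        exact pvMod_congr hk ((pvMod_self_congr hk a).add (pvMod_self_congr hk b))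

-- ===== A-side machinery =====

def pvStepA (k i : Int) (previous : Array Bool) : Array Bool :=
  (PySem.List.pyRange 0 k 1).foldl (fun current j =>
    if previous.getD j.toNat false then
      (current.setIfInBounds (PySem.Int.mod |j + i| k).toNat true).setIfInBounds
        (PySem.Int.mod |j - i| k).toNat true
    else current) (Array.replicate k.toNat false)

-- generic: the "if test then set two cells to true" fold, cell by cell
lemma pvFold_size (l : List Int) (p : Int → Bool) (a b : Int → Nat) (cur : Array Bool) :
    (l.foldl (fun c j => if p j then (c.setIfInBounds (a j) true).setIfInBounds (b j) true else c) cur).size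
      = cur.size := by
  induction l generalizing cur with
  | nil => rfl
  | cons x xs ih =>
    simp only [List.foldl_cons]
    split
    · rw [ih]; simp
    · exact ih cur

lemma pvFold_getD (l : List Int) (p : Int → Bool) (a b : Int → Nat) (cur : Array Bool) (m : Nat)
    (hb : ∀ j ∈ l, p j = true → a j < cur.size ∧ b j < cur.size) :
    ((l.foldl (fun c j => if p j then (c.setIfInBounds (a j) true).setIfInBounds (b j) true else c) cur).getD m false = true
      ↔ cur.getD m false = true ∨ ∃ j ∈ l, p j = true ∧ (a j = m ∨ b j = m)) := by
  induction l generalizing cur with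
  | nil => simp
  | cons x xs ih =>
    simp only [List.foldl_cons]
    by_cases hp : p x = true
    · have hax : a x < cur.size := (hb x (by simp) hp).1
      have hbx : b x < cur.size := (hb x (by simp) hp).2
      have hb' : ∀ j ∈ xs, p j = true →
          a j < ((cur.setIfInBounds (a x) true).setIfInBounds (b x) true).size ∧
          b j < ((cur.setIfInBounds (a x) true).setIfInBounds (b x) true).size := by
        intro j hj hpj
        have := hb j (List.mem_cons_of_mem _ hj) hpj
        simpa using this
      rw [if_pos hp, ih _ hb']
      have hget : ((cur.setIfInBounds (a x) true).setIfInBounds (b x) true).getD m false = true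
          ↔ cur.getD m false = true ∨ a x = m ∨ b x = m := by
        simp only [Array.getD_eq_getD_getElem?, Array.getElem?_setIfInBounds,
          Array.size_setIfInBounds]
        split_ifs <;> simp_all
      rw [hget, List.exists_mem_cons_iff]
      constructor
      · rintro ((h | h) | h)
        · exact Or.inl h
        · exact Or.inr (Or.inl ⟨hp, h⟩)
        · exact Or.inr (Or.inr h)
      · rintro (h | ⟨_, h⟩ | h)
        · exact Or.inl (Or.inl h)
        · exact Or.inl (Or.inr h)
        · exact Or.inr h
    · have hb' : ∀ j ∈ xs, p j = true → a j < cur.size ∧ b j < cur.size :=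
        fun j hj hpj => hb j (List.mem_cons_of_mem _ hj) hpj
      rw [if_neg hp, ih _ hb', List.exists_mem_cons_iff]
      constructor
      · rintro (h | h)
        exacts [Or.inl h, Or.inr (Or.inr h)]
      · rintro (h | ⟨hP, _⟩ | h)
        exacts [Or.inl h, absurd hP hp, Or.inr h]

-- the coupling invariant: cells of A's array are sound for signed-sum residues of the processed
-- prefix, and complete up to the overall sign (A's abs may collapse s and -s to one cell)
def pvInv (k : Int) (pref : List Int) (cur : Array Bool) : Prop :=
  cur.size = k.toNat ∧
  (∀ m : Nat, m < k.toNat → cur.getD m false = true →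
      ∃ s, PvSS pref s ∧ (m : Int) = PySem.Int.mod s k) ∧
  (∀ s, PvSS pref s → ∃ m : Nat, m < k.toNat ∧ cur.getD m false = true ∧
      ((m : Int) = PySem.Int.mod s k ∨ (m : Int) = PySem.Int.mod (-s) k))

lemma pvInv_init {k : Int} (hk : 1 ≤ k) :
    pvInv k [] ((Array.replicate k.toNat false).setIfInBounds 0 true) := by
  have hK : 0 < k.toNat := by omega
  have hget : ∀ m : Nat, m < k.toNat →
      (((Array.replicate k.toNat false).setIfInBounds 0 true : Array Bool).getD m false = true ↔ m = 0) := by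
    intro m hm
    rw [Array.getD_eq_getD_getElem?, Array.getElem?_setIfInBounds]
    rcases Nat.eq_zero_or_pos m with rfl | hmpos
    · simp [hK]
    · rw [if_neg (by omega), Array.getElem?_replicate, if_pos hm]
      simp; omega
  have h0 : PySem.Int.mod 0 k = 0 := by
    rw [PySem.Int.mod_eq_emod_of_pos (by omega)]; simp
  refine ⟨by simp, ?_, ?_⟩
  · intro m hm hc
    have := (hget m hm).mp hc
    subst this
    exact ⟨0, PvSS.nil, by simp [h0]⟩
  · intro s hs
    rw [pvSS_nil_iff] at hs; subst hs
    exact ⟨0, hK, (hget 0 hK).mpr rfl, Or.inl (by simp [h0])⟩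

lemma pvStep_inv {k : Int} (hk : 1 ≤ k) (i : Int) (pref : List Int) (prev : Array Bool)
    (h : pvInv k pref prev) : pvInv k (pref ++ [i]) (pvStepA k i prev) := by
  obtain ⟨hsize, hsound, hcompl⟩ := h
  have hkpos : (0 : Int) < k := hk
  have hmodpos : ∀ x : Int, 0 ≤ PySem.Int.mod x k := fun x => PySem.Int.mod_nonneg x hkpos
  have hmodlt : ∀ x : Int, PySem.Int.mod x k < k := fun x => PySem.Int.mod_lt x hkpos
  have hbnd : ∀ j ∈ PySem.List.pyRange 0 k 1, prev.getD j.toNat false = true →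
      (PySem.Int.mod |j + i| k).toNat < (Array.replicate k.toNat false : Array Bool).size ∧
      (PySem.Int.mod |j - i| k).toNat < (Array.replicate k.toNat false : Array Bool).size := by
    intro j _ _
    have h1 := hmodpos |j + i|; have h2 := hmodlt |j + i|
    have h3 := hmodpos |j - i|; have h4 := hmodlt |j - i|
    simp only [Array.size_replicate]; omega
  have hrep : ∀ m : Nat, (Array.replicate k.toNat false : Array Bool).getD m false = false := by
    intro m
    rw [Array.getD_eq_getD_getElem?, Array.getElem?_replicate]
    split <;> rfl
  have hnew : ∀ m : Nat, ((pvStepA k i prev).getD m false = true ↔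
      ∃ j ∈ PySem.List.pyRange 0 k 1, prev.getD j.toNat false = true ∧
        ((PySem.Int.mod |j + i| k).toNat = m ∨ (PySem.Int.mod |j - i| k).toNat = m)) := by
    intro m
    unfold pvStepA
    rw [pvFold_getD _ _ _ _ _ _ hbnd, hrep]
    simp
  have hext1 : ∀ s, PvSS pref s → PvSS (pref ++ [i]) (s + i) := fun s hs =>
    (pvSS_append _ _ _).mpr ⟨s, i, hs, (pvSS_singleton i i).mpr (Or.inl rfl), rfl⟩
  have hext2 : ∀ s, PvSS pref s → PvSS (pref ++ [i]) (s + -i) := fun s hs =>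
    (pvSS_append _ _ _).mpr ⟨s, -i, hs, (pvSS_singleton i (-i)).mpr (Or.inr rfl), rfl⟩
  refine ⟨by unfold pvStepA; rw [pvFold_size]; simp, ?_, ?_⟩
  · -- soundness
    intro m hm hc
    obtain ⟨j, hjr, hpj, hcase⟩ := (hnew m).mp hc
    have hj := PySem.List.mem_pyRange_one.mp hjr
    have hjt : j.toNat < k.toNat := by omega
    obtain ⟨s, hs, hjs⟩ := hsound j.toNat hjt hpj
    have hjmod : j = PySem.Int.mod s k := by omega
    rcases hcase with hcell | hcell
    · have habs := hmodpos |j + i|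
      rcases pvCell hkpos hjmod i with hc' | hc'
      · exact ⟨s + i, hext1 s hs, by omega⟩
      · rw [show -(s + i) = -s + -i by ring] at hc'
        exact ⟨-s + -i, hext2 (-s) (pvSS_neg hs), by omega⟩
    · have habs := hmodpos |j - i|
      rcases pvCell hkpos hjmod (-i) with hc' | hc' <;>
        rw [show j + -i = j - i by ring] at hc'
      · exact ⟨s + -i, hext2 s hs, by omega⟩
      · rw [show -(s + -i) = -s + i by ring] at hc'
        exact ⟨-s + i, hext1 (-s) (pvSS_neg hs), by omega⟩
  · -- completeness
    intro s' hs'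
    rw [pvSS_append] at hs'
    obtain ⟨a, b, ha, hb, rfl⟩ := hs'
    rw [pvSS_singleton] at hb
    obtain ⟨m₀, hm₀, hpm₀, hδ⟩ := hcompl a ha
    have hjr : ((m₀ : Int)) ∈ PySem.List.pyRange 0 k 1 :=
      PySem.List.mem_pyRange_one.mpr (by constructor <;> omega)
    have hmt : ((m₀ : Int)).toNat = m₀ := by omega
    have hp₀ : prev.getD ((m₀ : Int)).toNat false = true := by rwa [hmt]
    rcases hδ with hδ | hδ <;> rcases hb with hb | hb <;> rw [hb]
    · -- m₀ ≡ a, b = i : use the "+i" cell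
      have habs := hmodpos |(m₀ : Int) + i|
      have hlt := hmodlt |(m₀ : Int) + i|
      refine ⟨(PySem.Int.mod |(m₀ : Int) + i| k).toNat, by omega,
        (hnew _).mpr ⟨(m₀ : Int), hjr, hp₀, Or.inl rfl⟩, ?_⟩
      rcases pvCell hkpos hδ i with hc | hc
      · exact Or.inl (by omega)
      · exact Or.inr (by omega)
    · -- m₀ ≡ a, b = -i : use the "-i" cell
      have habs := hmodpos |(m₀ : Int) - i|
      have hlt := hmodlt |(m₀ : Int) - i|
      refine ⟨(PySem.Int.mod |(m₀ : Int) - i| k).toNat, by omega,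
        (hnew _).mpr ⟨(m₀ : Int), hjr, hp₀, Or.inr rfl⟩, ?_⟩
      rcases pvCell hkpos hδ (-i) with hc | hc <;>
        rw [show (m₀ : Int) + -i = (m₀ : Int) - i by ring] at hc
      · exact Or.inl (by omega)
      · exact Or.inr (by omega)
    · -- m₀ ≡ -a, b = i : use the "-i" cell (m₀ - i ≡ -(a + i))
      have habs := hmodpos |(m₀ : Int) - i|
      have hlt := hmodlt |(m₀ : Int) - i|
      refine ⟨(PySem.Int.mod |(m₀ : Int) - i| k).toNat, by omega,
        (hnew _).mpr ⟨(m₀ : Int), hjr, hp₀, Or.inr rfl⟩, ?_⟩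
      rcases pvCell hkpos hδ (-i) with hc | hc <;>
        rw [show (m₀ : Int) + -i = (m₀ : Int) - i by ring] at hc
      · rw [show -a + -i = -(a + i) by ring] at hc
        exact Or.inr (by omega)
      · rw [show -(-a + -i) = a + i by ring] at hc
        exact Or.inl (by omega)
    · -- m₀ ≡ -a, b = -i : use the "+i" cell (m₀ + i ≡ -(a - i))
      have habs := hmodpos |(m₀ : Int) + i|
      have hlt := hmodlt |(m₀ : Int) + i|
      refine ⟨(PySem.Int.mod |(m₀ : Int) + i| k).toNat, by omega,
        (hnew _).mpr ⟨(m₀ : Int), hjr, hp₀, Or.inl rfl⟩, ?_⟩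
      rcases pvCell hkpos hδ i with hc | hc
      · rw [show -a + i = -(a + -i) by ring] at hc
        exact Or.inr (by omega)
      · rw [show -(-a + i) = a + -i by ring] at hc
        exact Or.inl (by omega)

lemma pvFoldl_inv {k : Int} (hk : 1 ≤ k) :
    ∀ (nums pref : List Int) (cur : Array Bool), pvInv k pref cur →
      pvInv k (pref ++ nums) (nums.foldl (fun p i => pvStepA k i p) cur) := by
  intro nums
  induction nums with
  | nil => intro pref cur h; simpa using h
  | cons i rest ih =>
    intro pref cur h
    have := ih (pref ++ [i]) _ (pvStep_inv hk i pref cur h)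
    simpa using this

-- ===== VERDICT (by name: the statement is the Claim_ definition above) =====
theorem divisibility_dp_spec : Claim_equal_divisibility_dp := by
  intro nums k _ hk
  replace hk : 1 ≤ k := hk
  have hkpos : (0 : Int) < k := hk
  unfold Spec_divisibility_dp divisibility_dp divisibility_dp_alt
  have hinv := pvFoldl_inv hk nums [] _ (pvInv_init hk)
  simp only [List.nil_append, pvStepA] at hinv
  obtain ⟨hsize, hsound, hcompl⟩ := hinv
  have hK : 0 < k.toNat := by omega
  have hmemB : ∀ r : Int, r ∈ pvReach k nums ↔ ∃ s, PvSS nums s ∧ r = PySem.Int.mod s k :=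
    fun r => pvReach_mem hkpos nums.length nums le_rfl r
  rw [Bool.eq_iff_iff, PySem.Set.contains_iff, hmemB]
  constructor
  · intro hA
    obtain ⟨s, hs, hms⟩ := hsound 0 hK hA
    exact ⟨s, hs, by exact_mod_cast hms⟩
  · rintro ⟨s, hs, h0⟩
    have hdvd : k ∣ s := (PySem.Int.mod_eq_zero_iff_dvd s k).mp (by omega)
    have hneg : PySem.Int.mod (-s) k = 0 := (PySem.Int.mod_eq_zero_iff_dvd (-s) k).mpr hdvd.neg_right
    obtain ⟨m, hm, hc, hcase⟩ := hcompl s hs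
    have hm0 : m = 0 := by rcases hcase with h | h <;> omega
    subst hm0
    exact hc
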